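-- pv_equiv track=rewrite | github.com/ellipakbaz-pixel/rag | call_tree_builder.py | get_call_tree_statistics
-- ===== SOURCE A (Python) =====
-- from typing import List, Dict, Set, Tuple, Any
--
-- def get_call_tree_statistics(call_trees: List[Dict]) -> Dict:
--     """Get call tree statistics"""
--     stats = {
--         'total_functions': len(call_trees),
--         'functions_with_upstream': 0,
--         'functions_with_downstream': 0,
--         'max_upstream_count': 0,
--         'max_downstream_count': 0,
--         'isolated_functions': 0
--     }
--
--     for tree in call_trees:
--         upstream_count = tree.get('upstream_count', 0)
--         downstream_count = tree.get('downstream_count', 0)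
--
--         if upstream_count > 0:
--             stats['functions_with_upstream'] += 1
--             stats['max_upstream_count'] = max(stats['max_upstream_count'], upstream_count)
--
--         if downstream_count > 0:
--             stats['functions_with_downstream'] += 1
--             stats['max_downstream_count'] = max(stats['max_downstream_count'], downstream_count)
--
--         if upstream_count == 0 and downstream_count == 0:
--             stats['isolated_functions'] += 1
--
--     return stats
-- ===== SOURCE B (Python) =====
-- def get_call_tree_statistics(call_trees):
--     """Get call tree statistics"""
--     ups = [t.get('upstream_count', 0) for t in call_trees]
--     downs = [t.get('downstream_count', 0) for t in call_trees]
--     return {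
--         'total_functions': len(call_trees),
--         'functions_with_upstream': sum(1 for u in ups if u > 0),
--         'functions_with_downstream': sum(1 for d in downs if d > 0),
--         'max_upstream_count': max((u for u in ups if u > 0), default=0),
--         'max_downstream_count': max((d for d in downs if d > 0), default=0),
--         'isolated_functions': sum(1 for u, d in zip(ups, downs) if u == 0 and d == 0),
--     }
-- ===== Notes on version B (the rewrite author's own statement) =====
-- stated objective: idiomatic
-- what changed: Replaced the single fused accumulator loop over a mutated stats dict by independent reductions: two comprehension-built count lists and per-statistic sum/max/zip reductions with built-ins.
import Mathlib
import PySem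

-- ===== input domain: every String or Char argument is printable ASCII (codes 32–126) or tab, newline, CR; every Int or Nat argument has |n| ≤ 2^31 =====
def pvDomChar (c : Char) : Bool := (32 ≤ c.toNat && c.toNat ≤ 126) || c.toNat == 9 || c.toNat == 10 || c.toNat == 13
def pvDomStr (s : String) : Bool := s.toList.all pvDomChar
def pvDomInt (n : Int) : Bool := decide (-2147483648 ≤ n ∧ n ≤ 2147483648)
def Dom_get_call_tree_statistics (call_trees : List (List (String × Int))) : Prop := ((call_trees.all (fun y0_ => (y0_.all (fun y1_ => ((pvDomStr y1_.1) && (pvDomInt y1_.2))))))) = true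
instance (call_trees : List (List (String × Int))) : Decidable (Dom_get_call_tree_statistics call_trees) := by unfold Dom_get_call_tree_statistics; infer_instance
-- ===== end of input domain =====

-- B recomputes each statistic as an independent reduction (count lists + per-key sum/max/zip scans) instead of A's single fused accumulator loop; objective: idiomatic.


-- ===== PORT A =====
-- A's loop body: the five mutated dict counters (functions_with_upstream,
-- functions_with_downstream, max_upstream_count, max_downstream_count,
-- isolated_functions) are the accumulator; branches in the Python's order.
def aStep (st : Int × Int × Int × Int × Int) (tree : List (String × Int)) :
    Int × Int × Int × Int × Int :=
  let upstream_count := PySem.Dict.getD (PySem.Dict.mk tree) "upstream_count" 0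
  let downstream_count := PySem.Dict.getD (PySem.Dict.mk tree) "downstream_count" 0
  let st := if upstream_count > 0 then
      (st.1 + 1, st.2.1, max st.2.2.1 upstream_count, st.2.2.2.1, st.2.2.2.2) else st
  let st := if downstream_count > 0 then
      (st.1, st.2.1 + 1, st.2.2.1, max st.2.2.2.1 downstream_count, st.2.2.2.2) else st
  if upstream_count = 0 ∧ downstream_count = 0 then
      (st.1, st.2.1, st.2.2.1, st.2.2.2.1, st.2.2.2.2 + 1) else st

def get_call_tree_statistics (call_trees : List (List (String × Int))) : List (String × Int) :=
  let s := call_trees.foldl aStep (0, 0, 0, 0, 0)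
  [("total_functions", (call_trees.length : Int)),
   ("functions_with_upstream", s.1),
   ("functions_with_downstream", s.2.1),
   ("max_upstream_count", s.2.2.1),
   ("max_downstream_count", s.2.2.2.1),
   ("isolated_functions", s.2.2.2.2)]

-- ===== PORT B =====
def get_call_tree_statistics_alt (call_trees : List (List (String × Int))) : List (String × Int) :=
  let ups := call_trees.map (fun t => PySem.Dict.getD (PySem.Dict.mk t) "upstream_count" 0)
  let downs := call_trees.map (fun t => PySem.Dict.getD (PySem.Dict.mk t) "downstream_count" 0)
  [("total_functions", (call_trees.length : Int)),
   ("functions_with_upstream", ((ups.filter (fun u => u > 0)).length : Int)),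
   ("functions_with_downstream", ((downs.filter (fun d => d > 0)).length : Int)),
   ("max_upstream_count", (ups.filter (fun u => u > 0)).foldl max 0),
   ("max_downstream_count", (downs.filter (fun d => d > 0)).foldl max 0),
   ("isolated_functions", (((ups.zip downs).filter (fun p => p.1 = 0 ∧ p.2 = 0)).length : Int))]

-- ===== PRECONDITION & SPEC =====
def Spec_get_call_tree_statistics (call_trees : List (List (String × Int))) (out : List (String × Int)) : Prop := out = get_call_tree_statistics_alt call_trees
instance (call_trees : List (List (String × Int))) (out : List (String × Int)) : Decidable (Spec_get_call_tree_statistics call_trees out) := by unfold Spec_get_call_tree_statistics; infer_instance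

-- ===== CLAIM (what is proved, stated in full; the proofs are below) =====
def Claim_equal_get_call_tree_statistics : Prop := ∀ (call_trees : List (List (String × Int))), Dom_get_call_tree_statistics call_trees → Spec_get_call_tree_statistics call_trees (get_call_tree_statistics call_trees)

-- ===== LEMMAS AND PROOFS =====

theorem foldl_max_nonneg (xs : List Int) (c : Int) (hc : 0 ≤ c) : 0 ≤ xs.foldl max c := by
  induction xs generalizing c with
  | nil => exact hc
  | cons x xs ih => exact ih _ (le_trans hc (le_max_left c x))

theorem foldl_max_shift (xs : List Int) (c : Int) (hc : 0 ≤ c) :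
    xs.foldl max c = max c (xs.foldl max 0) := by
  induction xs generalizing c with
  | nil => simp; omega
  | cons x xs ih =>
    have h1 : 0 ≤ max c x := le_trans hc (le_max_left c x)
    have h2 : (0:Int) ≤ max 0 x := le_max_left 0 x
    have h3 : 0 ≤ xs.foldl max 0 := foldl_max_nonneg xs 0 le_rfl
    simp only [List.foldl_cons, ih _ h1, ih _ h2]
    omega

theorem aStep_eval (a b c d e : Int) (t : List (String × Int)) :
    aStep (a, b, c, d, e) t =
      (a + (if PySem.Dict.getD (PySem.Dict.mk t) "upstream_count" 0 > 0 then 1 else 0),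
       b + (if PySem.Dict.getD (PySem.Dict.mk t) "downstream_count" 0 > 0 then 1 else 0),
       (if PySem.Dict.getD (PySem.Dict.mk t) "upstream_count" 0 > 0 then
          max c (PySem.Dict.getD (PySem.Dict.mk t) "upstream_count" 0) else c),
       (if PySem.Dict.getD (PySem.Dict.mk t) "downstream_count" 0 > 0 then
          max d (PySem.Dict.getD (PySem.Dict.mk t) "downstream_count" 0) else d),
       e + (if PySem.Dict.getD (PySem.Dict.mk t) "upstream_count" 0 = 0 ∧
               PySem.Dict.getD (PySem.Dict.mk t) "downstream_count" 0 = 0 then 1 else 0)) := by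
  unfold aStep
  dsimp only
  split_ifs <;> simp_all [Prod.ext_iff] <;> omega

theorem fold_split (l : List (List (String × Int))) (a b c d e : Int)
    (hc : 0 ≤ c) (hd : 0 ≤ d) :
    l.foldl aStep (a, b, c, d, e)
    = (let ups := l.map (fun t => PySem.Dict.getD (PySem.Dict.mk t) "upstream_count" 0)
       let downs := l.map (fun t => PySem.Dict.getD (PySem.Dict.mk t) "downstream_count" 0)
       (a + ((ups.filter (fun u => u > 0)).length : Int),
        b + ((downs.filter (fun d => d > 0)).length : Int),
        max c ((ups.filter (fun u => u > 0)).foldl max 0),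
        max d ((downs.filter (fun d => d > 0)).foldl max 0),
        e + (((ups.zip downs).filter (fun p => p.1 = 0 ∧ p.2 = 0)).length : Int))) := by
  induction l generalizing a b c d e with
  | nil => simp [Prod.ext_iff]; omega
  | cons t l ih =>
    have hU := foldl_max_nonneg
      (((l.map (fun t => PySem.Dict.getD (PySem.Dict.mk t) "upstream_count" 0)).filter
        (fun u => decide (u > 0)))) 0 le_rfl
    have hV := foldl_max_nonneg
      (((l.map (fun t => PySem.Dict.getD (PySem.Dict.mk t) "downstream_count" 0)).filter
        (fun d => decide (d > 0)))) 0 le_rfl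
    set u := PySem.Dict.getD (PySem.Dict.mk t) "upstream_count" 0 with hu
    set v := PySem.Dict.getD (PySem.Dict.mk t) "downstream_count" 0 with hv
    have h1 : 0 ≤ (if u > 0 then max c u else c) := by split_ifs <;> omega
    have h2 : 0 ≤ (if v > 0 then max d v else d) := by split_ifs <;> omega
    rw [List.foldl_cons, aStep_eval, ih _ _ _ _ _ h1 h2]
    simp only [List.map_cons, List.zip_cons_cons, List.filter_cons, decide_eq_true_eq,
      Prod.ext_iff]
    refine ⟨?_, ?_, ?_, ?_, ?_⟩
    · split_ifs <;> simp [List.length_cons] <;> push_cast <;> omega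
    · split_ifs <;> simp [List.length_cons] <;> push_cast <;> omega
    · split_ifs with h
      · rw [List.foldl_cons, foldl_max_shift _ _ (by omega : 0 ≤ max 0 u)]
        omega
      · rfl
    · split_ifs with h
      · rw [List.foldl_cons, foldl_max_shift _ _ (by omega : 0 ≤ max 0 v)]
        omega
      · rfl
    · split_ifs <;> simp [List.length_cons] <;> push_cast <;> omega

-- ===== VERDICT (by name: the statement is the Claim_ definition above) =====
theorem get_call_tree_statistics_spec : Claim_equal_get_call_tree_statistics := by
  intro call_trees _
  unfold Spec_get_call_tree_statistics get_call_tree_statistics get_call_tree_statistics_alt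
  rw [fold_split _ _ _ _ _ _ le_rfl le_rfl]
  have hU := foldl_max_nonneg
    (((call_trees.map (fun t => PySem.Dict.getD (PySem.Dict.mk t) "upstream_count" 0)).filter
      (fun u => decide (u > 0)))) 0 le_rfl
  have hV := foldl_max_nonneg
    (((call_trees.map (fun t => PySem.Dict.getD (PySem.Dict.mk t) "downstream_count" 0)).filter
      (fun d => decide (d > 0)))) 0 le_rfl
  simp [max_eq_right hU, max_eq_right hV]
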